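-- pv_equiv track=rewrite | github.com/javirmones/fuzzy-rules | code/elsevier_algorithm.py | create_combo_var
-- ===== SOURCE A (Python) =====
-- from itertools import combinations
--
-- def pos_combinations(iterable, r):
--     # combinations('ABCD', 2) --> AB AC AD BC BD CD
--     # combinations(range(4), 3) --> 012 013 023 123
--     pool = tuple(iterable)
--     n = len(pool)
--     if r > n:
--         return
--     indices = list(range(r))
--     yield tuple(i for i in indices)
--     while True:
--         for i in reversed(range(r)):
--             if indices[i] != i + n - r:
--                 break
--         else:
--             return
--         indices[i] += 1
--         for j in range(i+1, r):
--             indices[j] = indices[j-1] + 1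
--         yield tuple(i for i in indices)
--
-- def obtener_lista(set_tuples):
--     return [list(set_tuples[x]) for x in range(0, len(set_tuples))]
--
-- def recompose_rule(rule_to_compose: list, pos: list, n_vars: int) -> list:
--     rule = [0 for x in range(0, n_vars)]
--     for v1, v2 in zip(rule_to_compose, pos):
--         rule[v2] = v1
--     return rule
--
-- def combo_vars(rule, comb) -> list:
--     combs = list(combinations(rule, comb))
--     pos = list(pos_combinations(rule, comb))
--     return combs, pos
--
-- def create_combo_var(rule, iterador) -> (list):
--     final_list = []
--     combos, pos = combo_vars(rule, iterador)
--     combos = obtener_lista(combos)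
--     pos = obtener_lista(pos)
--
--     for v1, v2 in zip(combos, pos):
--         if v1 not in final_list:
--             final_list.append(recompose_rule(v1, v2, len(rule)))
--
--     return final_list
-- ===== SOURCE B (Python) =====
-- from itertools import combinations
--
-- def create_combo_var(rule, iterador) -> (list):
--     n = len(rule)
--     final_list = []
--     for idxs in combinations(range(n), iterador):
--         final_list.append([rule[i] if i in idxs else 0 for i in range(n)])
--     return final_list
-- ===== Notes on version B (the rewrite author's own statement) =====
-- stated objective: simpler
-- what changed: B iterates once over index-combinations and builds each output vector directly (rule[i] at selected positions, 0 elsewhere), dropping A's hand-rolled position-combination generator, the parallel value-combination list, the zip, the recompose helper and the never-firing dedup membership test.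
import Mathlib
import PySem

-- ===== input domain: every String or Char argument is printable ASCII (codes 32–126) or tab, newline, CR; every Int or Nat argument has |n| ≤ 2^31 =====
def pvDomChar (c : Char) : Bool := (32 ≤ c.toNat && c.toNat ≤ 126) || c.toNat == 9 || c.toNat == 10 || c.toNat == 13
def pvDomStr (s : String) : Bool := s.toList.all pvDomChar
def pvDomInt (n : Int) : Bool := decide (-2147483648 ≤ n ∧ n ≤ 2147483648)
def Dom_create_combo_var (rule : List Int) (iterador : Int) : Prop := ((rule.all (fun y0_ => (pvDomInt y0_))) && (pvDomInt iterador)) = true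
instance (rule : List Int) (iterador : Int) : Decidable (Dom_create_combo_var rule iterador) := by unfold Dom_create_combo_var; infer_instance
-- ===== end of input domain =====

-- B is a single pass over index-combinations building each output vector directly; equal to A's
-- generate-values+positions/zip/recompose pipeline (A's dedup test never fires: it compares lists of
-- different lengths). Pre_ excludes iterador < 0, where both Pythons raise ValueError.

-- ===== PORT A =====
-- itertools.combinations, ported (for both ports) as the corresponding lexicographic-order enumerator
def pvCombs {α : Type} : List α → Nat → List (List α)
  | _, 0 => [[]]
  | [], _ + 1 => []
  | x :: xs, r + 1 => (pvCombs xs r).map (x :: ·) ++ pvCombs xs (r + 1)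
-- 'for i in reversed(range(r)): if indices[i] != i + n - r: break' (none = the 'else: return' branch)
def pvFind (indices : List Int) (n r : Nat) : Option Nat :=
  (List.range r).reverse.find? (fun i => indices.getD i 0 != (i : Int) + n - r)
-- 'for j in range(i+1, r): indices[j] = indices[j-1] + 1'  (indices are nonnegative: Nat positions are exact)
def pvReset (indices : List Int) (i r : Nat) : List Int :=
  (List.range' (i + 1) (r - (i + 1))).foldl (fun ind j => ind.set j (ind.getD (j - 1) 0 + 1)) indices
-- one iteration of the while-loop body ('indices[i] += 1' then the reset loop); none = the generator returns
def pvStep (indices : List Int) (n r : Nat) : Option (List Int) :=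
  match pvFind indices n r with
  | none => none
  | some i => some (pvReset (indices.set i (indices.getD i 0 + 1)) i r)
-- the 'while True' loop; the fuel Nat.choose n r only makes the recursion structural, it is never exhausted
def pvPosLoop (n r : Nat) : Nat → List Int → List (List Int)
  | 0, _ => []
  | fuel + 1, ind =>
    match pvStep ind n r with
    | none => []
    | some ind' => ind' :: pvPosLoop n r fuel ind'
def pos_combinations (rule : List Int) (r : Nat) : List (List Int) :=
  let n := rule.length
  if r > n then []
  else
    let ind0 := (List.range r).map (Int.ofNat ·)
    ind0 :: pvPosLoop n r (Nat.choose n r) ind0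
def obtener_lista (set_tuples : List (List Int)) : List (List Int) :=
  (List.range set_tuples.length).map (fun x => set_tuples.getD x [])
-- 'rule = [0]*n_vars; for v1, v2 in zip(...): rule[v2] = v1' (positions are nonnegative: .toNat is exact)
def recompose_rule (rule_to_compose pos : List Int) (n_vars : Nat) : List Int :=
  (rule_to_compose.zip pos).foldl (fun rl v => rl.set v.2.toNat v.1)
    ((List.range n_vars).map (fun _ => (0 : Int)))
def combo_vars (rule : List Int) (comb : Nat) : List (List Int) × List (List Int) :=
  (pvCombs rule comb, pos_combinations rule comb)
-- Pre_ gives 0 <= iterador (the Python raises ValueError otherwise), so .toNat is exact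
def create_combo_var (rule : List Int) (iterador : Int) : List (List Int) :=
  let cp := combo_vars rule iterador.toNat
  let combos := obtener_lista cp.1
  let pos := obtener_lista cp.2
  (combos.zip pos).foldl
    (fun final_list v =>
      if v.1 ∈ final_list then final_list
      else final_list ++ [recompose_rule v.1 v.2 rule.length]) []
def create_combo_var_alt (rule : List Int) (iterador : Int) : List (List Int) :=
  let n := rule.length
  (pvCombs (List.range n) iterador.toNat).map
    (fun idxs => (List.range n).map (fun i => if i ∈ idxs then rule.getD i 0 else 0))

-- ===== PRECONDITION & SPEC =====
-- iterador < 0 is excluded: there both Pythons raise ValueError (combinations' 'r must be non-negative')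
def Pre_create_combo_var (rule : List Int) (iterador : Int) : Prop := 0 ≤ iterador
instance (rule : List Int) (iterador : Int) : Decidable (Pre_create_combo_var rule iterador) := by unfold Pre_create_combo_var; infer_instance
def pvWitness_create_combo_var : List Int × Int := ([5, 7, 9], 2)

def Spec_create_combo_var (rule : List Int) (iterador : Int) (out : List (List Int)) : Prop := out = create_combo_var_alt rule iterador
instance (rule : List Int) (iterador : Int) (out : List (List Int)) : Decidable (Spec_create_combo_var rule iterador out) := by unfold Spec_create_combo_var; infer_instance

-- ===== CLAIM (what is proved, stated in full; the proofs are below) =====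
def Claim_equal_create_combo_var : Prop := ∀ (rule : List Int) (iterador : Int), Dom_create_combo_var rule iterador → Pre_create_combo_var rule iterador → Spec_create_combo_var rule iterador (create_combo_var rule iterador)

-- ===== LEMMAS AND PROOFS =====

-- [a, a+1, ..., a+r-1] as a list of Ints
def pvIR (a r : Nat) : List Int := (List.range' a r).map (Int.ofNat ·)
theorem pvCombs_length_mem {α : Type} : ∀ (l : List α) (r : Nat) (c : List α),
    c ∈ pvCombs l r → c.length = r := by
  intro l
  induction l with
  | nil => intro r c hc; cases r with
    | zero => simp [pvCombs] at hc; simp [hc]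
    | succ r => simp [pvCombs] at hc
  | cons x xs ih =>
    intro r c hc
    cases r with
    | zero => simp [pvCombs] at hc; simp [hc]
    | succ r =>
      simp [pvCombs] at hc
      rcases hc with ⟨d, hd, rfl⟩ | hc
      · simp [ih r d hd]
      · exact ih (r+1) c hc

theorem pvCombs_mem_mem {α : Type} : ∀ (l : List α) (r : Nat) (c : List α),
    c ∈ pvCombs l r → ∀ x ∈ c, x ∈ l := by
  intro l
  induction l with
  | nil => intro r c hc; cases r with
    | zero => simp [pvCombs] at hc; simp [hc]
    | succ r => simp [pvCombs] at hc
  | cons x xs ih =>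
    intro r c hc y hy
    cases r with
    | zero => simp [pvCombs] at hc; simp [hc] at hy
    | succ r =>
      simp [pvCombs] at hc
      rcases hc with ⟨d, hd, rfl⟩ | hc
      · rcases List.mem_cons.mp hy with rfl | hy
        · simp
        · exact List.mem_cons_of_mem _ (ih r d hd y hy)
      · exact List.mem_cons_of_mem _ (ih (r+1) c hc y hy)

theorem pvCombs_nil_of_lt {α : Type} : ∀ (l : List α) (r : Nat), l.length < r → pvCombs l r = [] := by
  intro l
  induction l with
  | nil => intro r h; cases r with
    | zero => omega
    | succ r => rfl
  | cons x xs ih =>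
    intro r h
    cases r with
    | zero => omega
    | succ r =>
      simp at h
      simp [pvCombs, ih r (by omega), ih (r+1) (by omega)]

theorem pvCombs_full {α : Type} : ∀ (l : List α), pvCombs l l.length = [l] := by
  intro l
  induction l with
  | nil => rfl
  | cons x xs ih =>
    simp [pvCombs, ih, pvCombs_nil_of_lt xs (xs.length + 1) (by omega)]

theorem pvCombs_map {α β : Type} (f : α → β) : ∀ (l : List α) (r : Nat),
    pvCombs (l.map f) r = (pvCombs l r).map (List.map f) := by
  intro l
  induction l with
  | nil => intro r; cases r <;> rfl
  | cons x xs ih =>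
    intro r
    cases r with
    | zero => rfl
    | succ r => simp [pvCombs, ih r, ih (r+1)]

theorem pvCombs_length {α : Type} : ∀ (l : List α) (r : Nat),
    (pvCombs l r).length = Nat.choose l.length r := by
  intro l
  induction l with
  | nil => intro r; cases r <;> rfl
  | cons x xs ih =>
    intro r
    cases r with
    | zero => rfl
    | succ r => simp [pvCombs, ih r, ih (r+1), Nat.choose_succ_succ]

theorem pv_map_range_getD (l : List Int) :
    (List.range l.length).map (fun i => l.getD i 0) = l := by
  apply List.ext_getElem
  · simp
  · intro i h1 h2
    simp [List.getElem?_eq_getElem h2]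


theorem pvIR_eq (v r : Nat) : pvIR v r = (List.range r).map (fun t : Nat => (v : Int) + (t : Int)) := by
  apply List.ext_getElem
  · simp [pvIR]
  · intro i h1 h2
    simp [pvIR, List.getElem_range']

theorem pvIR_cons (a r : Nat) : (a : Int) :: pvIR (a + 1) r = pvIR a (r + 1) := by
  simp [pvIR, List.range'_succ]




theorem pvFind_cons (a : Int) (x : List Int) (n r : Nat) :
    pvFind (a :: x) n (r + 1) =
      match pvFind x n r with
      | some i => some (i + 1)
      | none => if a ≠ (n : Int) - ((r : Int) + 1) then some 0 else none := by
  unfold pvFind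
  have h0 : (List.range (r+1)).reverse = ((List.range r).reverse.map Nat.succ) ++ [0] := by
    rw [List.range_succ_eq_map]
    simp
  rw [h0, List.find?_append, List.find?_map]
  have h1 : ((fun i => (a :: x).getD i 0 != (i : Int) + n - ((r : Nat) + 1 : Nat)) ∘ Nat.succ)
      = (fun i => x.getD i 0 != (i : Int) + n - r) := by
    funext i
    simp only [Function.comp]
    have e1 : (a :: x).getD (Nat.succ i) 0 = x.getD i 0 := by simp
    have e2 : ((Nat.succ i : Nat) : Int) + n - ((r : Nat) + 1 : Nat) = (i : Int) + n - r := by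
      push_cast; ring
    rw [e1, e2]
  rw [h1]
  cases hf : List.find? (fun i => x.getD i 0 != (i : Int) + n - r) (List.range r).reverse with
  | some i => simp
  | none =>
    simp only [Option.map_none, Option.none_or]
    by_cases ha : a = (n : Int) - ((r : Int) + 1)
    · simp [List.find?, ha]
    · simp only [List.find?]
      have hb : ((a :: x).getD 0 0 != ((0:Nat) : Int) + n - ((r:Nat)+1:Nat)) = true := by
        rw [bne_iff_ne]
        intro hc
        apply ha
        rw [show (a :: x).getD 0 0 = a from rfl] at hc
        rw [hc]; push_cast; ring
      rw [hb]
      simp [ha]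

theorem pvFind_lt (x : List Int) (n r i : Nat) (h : pvFind x n r = some i) : i < r := by
  have := List.mem_of_find?_eq_some h
  simp at this
  omega

theorem pv_getD_append_len (pre : List Int) (v : Int) (l : List Int) :
    (pre ++ v :: l).getD pre.length 0 = v := by
  simp [List.getD]

theorem pv_set_append (pre : List Int) (l : List Int) (k : Nat) (z : Int) :
    (pre ++ l).set (pre.length + k) z = pre ++ l.set k z := by
  induction pre with
  | nil => simp
  | cons p pre ih => simp [Nat.succ_add, ih]

theorem pvReset_spec : ∀ (suf pre : List Int) (v : Int),
    (List.range' (pre.length + 1) suf.length).foldl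
        (fun ind j => ind.set j (ind.getD (j - 1) 0 + 1)) (pre ++ v :: suf)
      = pre ++ (List.range (suf.length + 1)).map (fun t : Nat => v + (t : Int)) := by
  intro suf
  induction suf with
  | nil => intro pre v; simp
  | cons w suf ih =>
    intro pre v
    rw [show (w :: suf).length = suf.length + 1 from rfl, List.range'_succ, List.foldl_cons]
    have e1 : (pre ++ v :: w :: suf).set (pre.length + 1)
        ((pre ++ v :: w :: suf).getD (pre.length + 1 - 1) 0 + 1) = (pre ++ [v]) ++ (v + 1) :: suf := by
      rw [Nat.add_sub_cancel, pv_getD_append_len, pv_set_append]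
      simp
    rw [e1]
    have e2 : pre.length + 1 + 1 = (pre ++ [v]).length + 1 := by simp
    rw [e2, ih (pre ++ [v]) (v + 1)]
    rw [List.append_assoc]
    congr 1
    rw [List.range_succ_eq_map (n := suf.length + 1)]
    simp only [List.map_cons, List.map_map, List.cons_append, List.nil_append]
    congr 1
    · simp
    · apply List.map_congr_left
      intro t _
      simp [Function.comp]
      ring

theorem pvStep_closed (x : List Int) (n r i : Nat) (hlen : x.length = r)
    (h : pvFind x n r = some i) :
    pvStep x n r = some (x.take i ++ (List.range (r - i)).map (fun t : Nat => (x.getD i 0 + 1) + (t : Int))) := by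
  have hi : i < r := pvFind_lt x n r i h
  unfold pvStep
  rw [h]
  dsimp only
  unfold pvReset
  have hset : x.set i (x.getD i 0 + 1) = x.take i ++ (x.getD i 0 + 1) :: x.drop (i + 1) := by
    rw [List.set_eq_take_append_cons_drop]
    simp [hlen, hi]
  rw [hset]
  have hpre : (x.take i).length = i := by simp [hlen]; omega
  have hsuf : (x.drop (i + 1)).length = r - (i + 1) := by simp [hlen]
  rw [show List.range' (i + 1) (r - (i + 1)) =
      List.range' ((x.take i).length + 1) (x.drop (i + 1)).length by rw [hpre, hsuf]]
  rw [pvReset_spec]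
  have hfin : (x.drop (i + 1)).length + 1 = r - i := by
    simp [hlen]
    omega
  rw [hfin]

theorem pvFind_max (n r : Nat) (h : r ≤ n) : pvFind (pvIR (n - r) r) n r = none := by
  apply List.find?_eq_none.mpr
  intro i hi
  simp at hi
  have hlen : i < (pvIR (n - r) r).length := by simp [pvIR]; omega
  have : (pvIR (n - r) r).getD i 0 = ((n - r + i : Nat) : Int) := by
    rw [List.getD_eq_getElem _ _ hlen]
    simp [pvIR, List.getElem_range']
  rw [this]
  simp [bne_iff_ne]
  omega

theorem pvStep_max_none (n r : Nat) (h : r ≤ n) : pvStep (pvIR (n - r) r) n r = none := by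
  unfold pvStep
  rw [pvFind_max n r h]

theorem pvStep_cons (a : Int) (x y : List Int) (n r : Nat) (hlen : x.length = r)
    (h : pvStep x n r = some y) : pvStep (a :: x) n (r + 1) = some (a :: y) := by
  unfold pvStep at h
  cases hf : pvFind x n r with
  | none => rw [hf] at h; simp at h
  | some i =>
    rw [hf] at h
    have hi : i < r := pvFind_lt x n r i hf
    have hy : y = x.take i ++ (List.range (r - i)).map (fun t : Nat => (x.getD i 0 + 1) + (t : Int)) := by
      have := pvStep_closed x n r i hlen hf
      unfold pvStep at this
      rw [hf] at this
      simpa using (Option.some.inj (h.symm.trans this))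
    have hf2 : pvFind (a :: x) n (r + 1) = some (i + 1) := by rw [pvFind_cons, hf]
    have := pvStep_closed (a :: x) n (r + 1) (i + 1) (by simp [hlen]) hf2
    rw [this]
    congr 1
    rw [hy]
    simp [List.take_succ_cons]

theorem pvStep_link (a n r : Nat) (hr : r ≤ n) (ha : a + r + 2 ≤ n) :
    pvStep ((a : Int) :: pvIR (n - r) r) n (r + 1) = some (pvIR (a + 1) (r + 1)) := by
  have hf : pvFind ((a : Int) :: pvIR (n - r) r) n (r + 1) = some 0 := by
    rw [pvFind_cons, pvFind_max n r hr]
    have hne : (a : Int) ≠ (n : Int) - ((r : Int) + 1) := by intro hc; omega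
    simp [hne]
  have hlen : ((a : Int) :: pvIR (n - r) r).length = r + 1 := by simp [pvIR]
  have := pvStep_closed _ n (r + 1) 0 hlen hf
  rw [this]
  simp only [List.take_zero, List.nil_append, Nat.sub_zero, List.getD_cons_zero]
  rw [pvIR_eq]
  have he : (fun t : Nat => ((a : Int) + 1) + (t : Int)) = (fun t : Nat => (((a + 1 : Nat)) : Int) + (t : Int)) := by
    funext t
    push_cast
    ring
  rw [he]

theorem pv_chain_imp_mem {α : Type} {R S : α → α → Prop} :
    ∀ (l : List α), (∀ x ∈ l, ∀ y, R x y → S x y) → List.IsChain R l → List.IsChain S l := by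
  intro l
  induction l with
  | nil => intro _ _; simp
  | cons a l ih =>
    intro hmem hch
    cases l with
    | nil => simp
    | cons b l' =>
      rw [List.isChain_cons_cons] at hch ⊢
      exact ⟨hmem a (by simp) b hch.1, ih (fun x hx => hmem x (by simp [hx])) hch.2⟩

theorem pvCombChain : ∀ (k a r : Nat), r ≤ k →
    (((pvCombs (List.range' a k) r).map (List.map (Int.ofNat ·))) ≠ [] ∧
     ((pvCombs (List.range' a k) r).map (List.map (Int.ofNat ·))).head? = some (pvIR a r) ∧
     ((pvCombs (List.range' a k) r).map (List.map (Int.ofNat ·))).getLast? = some (pvIR (a + (k - r)) r) ∧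
     List.IsChain (fun x y => pvStep x (a + k) r = some y)
       ((pvCombs (List.range' a k) r).map (List.map (Int.ofNat ·)))) := by
  intro k
  induction k with
  | zero =>
    intro a r hr
    have : r = 0 := by omega
    subst this
    simp [pvCombs, pvIR]
  | succ k ih =>
    intro a r hr
    cases r with
    | zero => simp [pvCombs, pvIR]
    | succ r =>
      have hrk : r ≤ k := by omega
      have hM : (pvCombs (List.range' a (k+1)) (r+1)).map (List.map (Int.ofNat ·))
          = ((pvCombs (List.range' (a+1) k) r).map (List.map (Int.ofNat ·))).map (((a : Int)) :: ·)
            ++ (pvCombs (List.range' (a+1) k) (r+1)).map (List.map (Int.ofNat ·)) := by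
        rw [List.range'_succ]
        simp [pvCombs, List.map_map]
      obtain ⟨hne1, hhd1, hlast1, hch1⟩ := ih (a+1) r hrk
      have hn : (a + 1) + k = a + (k + 1) := by omega
      rw [hn] at hch1
      have hlen1 : ∀ x ∈ (pvCombs (List.range' (a+1) k) r).map (List.map (Int.ofNat ·)),
          x.length = r := by
        intro x hx
        simp at hx
        obtain ⟨c, hc, rfl⟩ := hx
        simp [pvCombs_length_mem _ _ _ hc]
      have hch1' : List.IsChain (fun x y => pvStep x (a + (k+1)) (r+1) = some y)
          (((pvCombs (List.range' (a+1) k) r).map (List.map (Int.ofNat ·))).map (((a : Int)) :: ·)) := by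
        rw [List.isChain_map]
        apply pv_chain_imp_mem _ _ hch1
        intro x hx y hR
        exact pvStep_cons (a : Int) x y (a + (k+1)) r (hlen1 x hx) hR
      have hhdm : (((pvCombs (List.range' (a+1) k) r).map (List.map (Int.ofNat ·))).map (((a : Int)) :: ·)).head?
          = some (pvIR a (r+1)) := by
        rw [List.head?_map, hhd1]
        simp [pvIR_cons]
      have hlastm : (((pvCombs (List.range' (a+1) k) r).map (List.map (Int.ofNat ·))).map (((a : Int)) :: ·)).getLast?
          = some ((a : Int) :: pvIR ((a+1) + (k - r)) r) := by
        rw [List.getLast?_map, hlast1]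
        rfl
      by_cases hk : r + 1 ≤ k
      · obtain ⟨hne2, hhd2, hlast2, hch2⟩ := ih (a+1) (r+1) hk
        rw [hn] at hch2
        have hH : ((pvCombs (List.range' a (k+1)) (r+1)).map (List.map (Int.ofNat ·))).head?
            = some (pvIR a (r+1)) := by
          rw [hM, List.head?_append, hhdm]
          rfl
        refine ⟨?_, hH, ?_, ?_⟩
        · intro hc
          rw [hc] at hH
          simp at hH
        · rw [hM, List.getLast?_append, hlast2]
          have he : (a+1) + (k - (r+1)) = a + ((k+1) - (r+1)) := by omega
          rw [he]
          rfl
        · rw [hM, List.isChain_append]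
          refine ⟨hch1', hch2, ?_⟩
          intro x hx y hy
          rw [hlastm] at hx
          rw [hhd2] at hy
          simp at hx hy
          subst hx
          subst hy
          have hg : (a+1) + (k - r) = (a + (k + 1)) - r := by omega
          rw [hg]
          exact pvStep_link a (a + (k+1)) r (by omega) (by omega)
      · have hrk2 : r = k := by omega
        subst hrk2
        have h2nil : pvCombs (List.range' (a+1) r) (r+1) = [] :=
          pvCombs_nil_of_lt _ _ (by simp)
        have hH : ((pvCombs (List.range' a (r+1)) (r+1)).map (List.map (Int.ofNat ·))).head?
            = some (pvIR a (r+1)) := by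
          rw [hM, h2nil]
          simp only [List.map_nil, List.append_nil]
          rw [hhdm]
        refine ⟨?_, hH, ?_, ?_⟩
        · intro hc
          rw [hc] at hH
          simp at hH
        · rw [hM, h2nil]
          simp only [List.map_nil, List.append_nil]
          rw [hlastm]
          simp
          rw [pvIR_cons]
        · rw [hM, h2nil]
          simp only [List.map_nil, List.append_nil]
          exact hch1'





theorem pvPosLoop_run (n r : Nat) : ∀ (l : List (List Int)) (x : List Int) (fuel : Nat),
    List.IsChain (fun u v => pvStep u n r = some v) (x :: l) →
    (∀ z, (x :: l).getLast? = some z → pvStep z n r = none) →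
    l.length ≤ fuel → pvPosLoop n r fuel x = l := by
  intro l
  induction l with
  | nil =>
    intro x fuel _ hlast _
    have hx : pvStep x n r = none := hlast x rfl
    cases fuel with
    | zero => rfl
    | succ f => simp [pvPosLoop, hx]
  | cons y l ih =>
    intro x fuel hch hlast hfuel
    cases fuel with
    | zero => simp at hfuel
    | succ f =>
      rw [List.isChain_cons_cons] at hch
      simp [pvPosLoop, hch.1]
      exact ih y f hch.2 (fun z hz => hlast z hz) (by simpa using hfuel)

theorem pvPos_eq (rule : List Int) (r : Nat) :
    pos_combinations rule r = (pvCombs (List.range rule.length) r).map (List.map (Int.ofNat ·)) := by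
  by_cases h : rule.length < r
  · rw [pvCombs_nil_of_lt _ _ (by simpa using h)]
    simp [pos_combinations, h]
  · have hr : r ≤ rule.length := by omega
    obtain ⟨hne, hhd, hlast, hch⟩ := pvCombChain rule.length 0 r hr
    rw [List.range_eq_range']
    set M := (pvCombs (List.range' 0 rule.length) r).map (List.map (Int.ofNat ·)) with hMdef
    obtain ⟨x, l, hxl⟩ := List.exists_cons_of_ne_nil hne
    have hx : x = pvIR 0 r := by
      rw [hxl] at hhd
      simpa using hhd
    have hind0 : (List.range r).map (Int.ofNat ·) = pvIR 0 r := by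
      rw [pvIR, List.range_eq_range']
    unfold pos_combinations
    simp only [if_neg (by omega : ¬ r > rule.length)]
    rw [hxl, hind0, ← hx]
    congr 1
    apply pvPosLoop_run
    · rw [← hxl]
      simpa using hch
    · intro z hz
      rw [← hxl] at hz
      rw [hlast] at hz
      have hz' : z = pvIR (0 + (rule.length - r)) r := by simpa using hz.symm
      rw [hz']
      have : (0 + (rule.length - r)) = rule.length - r := by omega
      rw [this]
      exact pvStep_max_none rule.length r hr
    · have hMlen : M.length = Nat.choose rule.length r := by
        rw [hMdef]
        simp [pvCombs_length]
      rw [hxl] at hMlen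
      simp at hMlen
      omega

theorem pv_obtener_id (l : List (List Int)) : obtener_lista l = l := by
  unfold obtener_lista
  apply List.ext_getElem
  · simp
  · intro i h1 h2
    simp [List.getD, List.getElem?_eq_getElem h2]

theorem pv_recompose_len (v1 v2 : List Int) (n : Nat) : (recompose_rule v1 v2 n).length = n := by
  unfold recompose_rule
  have : ∀ (P : List (Int × Int)) (acc : List Int),
      (P.foldl (fun rl v => rl.set v.2.toNat v.1) acc).length = acc.length := by
    intro P
    induction P with
    | nil => intro acc; rfl
    | cons p P ih => intro acc; rw [List.foldl_cons, ih]; simp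
  rw [this]
  simp

theorem pv_fold_nodedup (n : Nat) (F : List Int × List Int → List Int) (hF : ∀ p, (F p).length = n) :
    ∀ (P : List (List Int × List Int)) (acc : List (List Int)),
    (∀ x ∈ acc, x.length = n) → (∀ p ∈ P, p.1.length ≠ n) →
    P.foldl (fun fl p => if p.1 ∈ fl then fl else fl ++ [F p]) acc = acc ++ P.map F := by
  intro P
  induction P with
  | nil => intro acc _ _; simp
  | cons p P ih =>
    intro acc hacc hP
    rw [List.foldl_cons]
    have hnot : p.1 ∉ acc := by
      intro hmem
      exact hP p (by simp) (hacc _ hmem)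
    rw [if_neg hnot, ih (acc ++ [F p])
      (by intro x hx
          rcases List.mem_append.mp hx with hx | hx
          · exact hacc x hx
          · simp at hx; simp [hx, hF])
      (fun q hq => hP q (by simp [hq]))]
    simp

theorem pv_foldset_getD (g : Nat → Int) :
    ∀ (c : List Nat) (acc : List Int) (j : Nat), (∀ i ∈ c, i < acc.length) →
      (c.foldl (fun a i => a.set i (g i)) acc).getD j 0
        = if j ∈ c then g j else acc.getD j 0 := by
  intro c
  induction c with
  | nil => intro acc j _; simp
  | cons i c ih =>
    intro acc j hlt
    rw [List.foldl_cons, ih (acc.set i (g i)) j (by simpa using fun t ht => hlt t (by simp [ht]))]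
    by_cases hjc : j ∈ c
    · simp [hjc]
    · have hi : i < acc.length := hlt i (by simp)
      by_cases hji : j = i
      · subst hji
        simp [hjc, List.getElem?_set_self hi]
      · simp [hjc, hji, List.getElem?_set_ne (fun h => hji h.symm)]

theorem pv_foldset_len (g : Nat → Int) :
    ∀ (c : List Nat) (acc : List Int), (c.foldl (fun a i => a.set i (g i)) acc).length = acc.length := by
  intro c
  induction c with
  | nil => intro acc; rfl
  | cons i c ih => intro acc; rw [List.foldl_cons, ih]; simp

theorem pv_recompose_eq (rule : List Int) (c : List Nat) (h : ∀ i ∈ c, i < rule.length) :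
    recompose_rule (c.map (fun i => rule.getD i 0)) (c.map (Int.ofNat ·)) rule.length
      = (List.range rule.length).map (fun i => if i ∈ c then rule.getD i 0 else 0) := by
  unfold recompose_rule
  rw [List.zip_map', List.foldl_map]
  have hfn : (fun (a : List Int) (i : Nat) => a.set ((Int.ofNat i)).toNat (rule.getD i 0))
      = (fun (a : List Int) (i : Nat) => a.set i (rule.getD i 0)) := by
    funext a i
    simp
  rw [hfn]
  have hlen0 : ((List.range rule.length).map (fun _ => (0 : Int))).length = rule.length := by simp
  apply List.ext_getElem
  · rw [pv_foldset_len]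
    simp
  · intro i h1 h2
    simp only [List.length_map, List.length_range] at h2
    rw [← List.getD_eq_getElem _ 0 h1, pv_foldset_getD (fun i => rule.getD i 0) c _ i
      (by rw [hlen0]; exact h)]
    by_cases hic : i ∈ c
    · simp [hic, h2]
    · simp [hic, h2, List.getD]




theorem pv_main (rule : List Int) (iterador : Int) :
    create_combo_var rule iterador = create_combo_var_alt rule iterador := by
  unfold create_combo_var create_combo_var_alt combo_vars
  simp only [pv_obtener_id]
  rw [pvPos_eq]
  have hcombs : pvCombs rule iterador.toNat
      = (pvCombs (List.range rule.length) iterador.toNat).map (List.map (fun i => rule.getD i 0)) := by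
    conv_lhs => rw [← pv_map_range_getD rule]
    rw [pvCombs_map]
  rw [hcombs, List.zip_map']
  rw [List.foldl_map]
  by_cases hlt : rule.length < iterador.toNat
  · rw [pvCombs_nil_of_lt _ _ (by simpa using hlt)]
    rfl
  · by_cases heq : iterador.toNat = rule.length
    · have hfull : pvCombs (List.range rule.length) iterador.toNat = [List.range rule.length] := by
        have h1 := pvCombs_full (List.range rule.length)
        rw [List.length_range] at h1
        rw [heq]
        exact h1
      rw [hfull]
      simp only [List.foldl_cons, List.foldl_nil, List.not_mem_nil, List.map_cons,
        List.map_nil, List.nil_append, if_false]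
      rw [pv_recompose_eq rule (List.range rule.length) (by intro i hi; simpa using hi)]
    · have hr : iterador.toNat ≠ rule.length := heq
      have := pv_fold_nodedup rule.length (fun p => recompose_rule p.1 p.2 rule.length)
        (fun p => pv_recompose_len p.1 p.2 rule.length)
        ((pvCombs (List.range rule.length) iterador.toNat).map
          (fun c => (c.map (fun i => rule.getD i 0), c.map (Int.ofNat ·))))
        [] (by intro x hx; simp at hx) ?hP
      · rw [List.foldl_map] at this
        rw [this]
        simp only [List.nil_append, List.map_map]
        apply List.map_congr_left
        intro c hc
        simp only [Function.comp]
        exact pv_recompose_eq rule c (fun i hi => by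
          have := pvCombs_mem_mem _ _ _ hc i hi
          simpa using this)
      · intro p hp
        simp at hp
        obtain ⟨c, hc, rfl⟩ := hp
        simp [pvCombs_length_mem _ _ _ hc, hr]

-- ===== VERDICT (by name: the statement is the Claim_ definition above) =====
theorem create_combo_var_spec : Claim_equal_create_combo_var := by
  intro rule iterador _ _
  unfold Spec_create_combo_var
  exact pv_main rule iterador
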